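-- pv_equiv track=rewrite | github.com/BOTC3PO/Proyecto_final | apps/web/archive/herramientas/xml_to_jsonl.py | sanitize_bucket_name
-- ===== SOURCE A (Python) =====
-- def sanitize_bucket_name(bucket: str) -> str:
--     """
--     Sanitiza el nombre del bucket para que sea válido en sistemas de archivos.
--     Windows no permite: < > : " / \ | ? *
--     """
--     # Caracteres prohibidos en Windows
--     forbidden = ['<', '>', ':', '"', '/', '\\', '|', '?', '*']
--
--     for char in forbidden:
--         if char in bucket:
--             # Reemplazar con guión bajo
--             bucket = bucket.replace(char, '_')
--
--     # Si quedó vacío después de sanitizar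
--     if not bucket or bucket.isspace():
--         return "_"
--
--     return bucket.strip()
-- ===== SOURCE B (Python) =====
-- FORBIDDEN = frozenset('<>:"/\\|?*')
--
-- def sanitize_bucket_name(bucket: str) -> str:
--     """Single pass: replace each Windows-forbidden character with '_'."""
--     result = ''.join('_' if c in FORBIDDEN else c for c in bucket)
--     if not result or result.isspace():
--         return "_"
--     return result.strip()
-- ===== Notes on version B (the rewrite author's own statement) =====
-- stated objective: idiomatic
-- what changed: A scans the whole string once per forbidden character (nine sequential 'in' tests plus .replace passes); B traverses the string exactly once, mapping each character through a frozenset membership test, then applies the same empty/isspace/strip tail.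
import Mathlib
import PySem

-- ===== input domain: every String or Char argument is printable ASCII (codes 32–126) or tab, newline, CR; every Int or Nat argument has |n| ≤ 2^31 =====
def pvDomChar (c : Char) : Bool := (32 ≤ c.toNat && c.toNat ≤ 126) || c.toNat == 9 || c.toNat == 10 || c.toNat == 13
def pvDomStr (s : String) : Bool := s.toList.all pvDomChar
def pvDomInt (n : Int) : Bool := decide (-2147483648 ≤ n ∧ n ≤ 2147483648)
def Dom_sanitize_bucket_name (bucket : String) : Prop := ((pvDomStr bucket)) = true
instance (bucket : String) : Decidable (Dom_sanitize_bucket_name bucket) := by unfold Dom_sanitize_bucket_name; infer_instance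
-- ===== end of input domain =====

-- B replaces A's nine sequential .replace scans with one pass over the string via set membership; same tail logic; return values proved equal for all inputs.
-- ===== PORT A =====
def sanitize_bucket_name (bucket : String) : String :=
  let forbidden : List String := ["<", ">", ":", "\"", "/", "\\", "|", "?", "*"]
  let bucket := forbidden.foldl (fun b ch =>
    if PySem.Str.isIn ch b then PySem.Str.replace b ch "_" else b) bucket
  if PySem.Str.len bucket = 0 ∨ PySem.Str.strIsspace bucket then "_"
  else PySem.Str.strip bucket

-- ===== PORT B =====
def forbiddenSet : PySem.Set Char := PySem.Set.ofList ['<', '>', ':', '\"', '/', '\\', '|', '?', '*']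

def sanitize_bucket_name_alt (bucket : String) : String :=
  let result := String.ofList (bucket.toList.map (fun c => if c ∈ forbiddenSet then '_' else c))
  if PySem.Str.len result = 0 ∨ PySem.Str.strIsspace result then "_"
  else PySem.Str.strip result

-- ===== PRECONDITION & SPEC =====
def Spec_sanitize_bucket_name (bucket : String) (out : String) : Prop := out = sanitize_bucket_name_alt bucket
instance (bucket : String) (out : String) : Decidable (Spec_sanitize_bucket_name bucket out) := by unfold Spec_sanitize_bucket_name; infer_instance

-- ===== CLAIM (what is proved, stated in full; the proofs are below) =====
def Claim_equal_sanitize_bucket_name : Prop := ∀ (bucket : String), Dom_sanitize_bucket_name bucket → Spec_sanitize_bucket_name bucket (sanitize_bucket_name bucket)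

-- ===== LEMMAS AND PROOFS =====

theorem replace_go_single (c d : Char) : ∀ (fuel : Nat) (l acc : List Char), l.length ≤ fuel →
    PySem.Chars.replace.go [c] [d] fuel l acc
      = acc.reverse ++ l.map (fun x => if x = c then d else x) := by
  intro fuel
  induction fuel with
  | zero => intro l acc h; cases l with
    | nil => simp [PySem.Chars.replace.go]
    | cons a t => simp at h
  | succ n ih =>
    intro l acc h
    cases l with
    | nil => simp [PySem.Chars.replace.go]
    | cons a t =>
      simp only [PySem.Chars.replace.go]
      by_cases hac : a = c
      · subst hac
        have : List.isPrefixOf [a] (a :: t) = true := by simp [List.isPrefixOf]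
        rw [if_pos this]
        simp only [List.length_cons, List.drop_succ_cons, List.length_nil, List.drop_zero]
        rw [ih t _ (by simpa using h)]
        simp
      · have : List.isPrefixOf [c] (a :: t) = false := by
          simp [List.isPrefixOf]; intro hh; exact absurd hh.symm (by exact fun e => hac e)
        rw [if_neg (by simp [this])]
        rw [ih t _ (by simpa using h)]
        simp [hac]

theorem replace_single (c d : Char) (l : List Char) :
    PySem.Chars.replace l [c] [d] = l.map (fun x => if x = c then d else x) := by
  rw [PySem.Chars.replace]
  simp only [List.isEmpty_cons]
  rw [if_neg (by simp)]
  simpa using replace_go_single c d l.length l [] le_rfl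


theorem singleton_infix {c : Char} {l : List Char} : [c] <:+: l ↔ c ∈ l := by
  constructor
  · intro h; exact h.mem (by simp)
  · intro h
    obtain ⟨a, b, hab, -⟩ := List.eq_append_cons_of_mem h
    exact ⟨a, b, by simp [hab]⟩

theorem step_toList (s ch : String) (c : Char) (hch : ch.toList = [c]) :
    (if PySem.Str.isIn ch s then PySem.Str.replace s ch "_" else s).toList
      = s.toList.map (fun x => if x = c then '_' else x) := by
  have hu : ("_" : String).toList = ['_'] := rfl
  by_cases h : PySem.Str.isIn ch s = true
  · rw [if_pos h, PySem.Str.toList_replace, hch, hu]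
    exact replace_single c '_' s.toList
  · rw [if_neg h]
    have hmem : c ∉ s.toList := by
      intro hc
      apply h
      rw [PySem.Str.isIn_eq, hch]
      exact (PySem.Chars.isIn_iff_infix _ _).mpr (singleton_infix.mpr hc)
    have hm : s.toList.map (fun x => if x = c then '_' else x) = s.toList.map id := by
      apply List.map_congr_left
      intro a ha
      have hne : a ≠ c := fun e => hmem (e ▸ ha)
      simp [hne]
    rw [hm, List.map_id]

theorem fold_map (cs : List Char) : ∀ (l : List Char),
    cs.foldl (fun b c => b.map (fun x => if x = c then '_' else x)) l
      = l.map (fun x => if x ∈ cs then '_' else x) := by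
  induction cs with
  | nil => intro l; simp
  | cons c cs ih =>
    intro l
    simp only [List.foldl_cons]
    rw [ih, List.map_map]
    apply List.map_congr_left
    intro a _
    by_cases hac : a = c
    · subst hac; simp
    · simp [hac]


theorem foldA (chs : List Char) : ∀ (s : String),
    ((chs.map (fun c => String.ofList [c])).foldl
        (fun b ch => if PySem.Str.isIn ch b then PySem.Str.replace b ch "_" else b) s).toList
      = chs.foldl (fun l c => l.map (fun x => if x = c then '_' else x)) s.toList := by
  induction chs with
  | nil => intro s; simp
  | cons c cs ih =>
    intro s
    simp only [List.map_cons, List.foldl_cons]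
    rw [ih, step_toList s (String.ofList [c]) c (by simp)]


theorem ab_eq (b : String) : sanitize_bucket_name b = sanitize_bucket_name_alt b := by
  simp only [sanitize_bucket_name, sanitize_bucket_name_alt]
  have hlist : (["<", ">", ":", "\"", "/", "\\", "|", "?", "*"] : List String)
      = (['<', '>', ':', '\"', '/', '\\', '|', '?', '*'] : List Char).map (fun c => String.ofList [c]) := by
    decide
  have hkey : ((["<", ">", ":", "\"", "/", "\\", "|", "?", "*"] : List String).foldl
        (fun b ch => if PySem.Str.isIn ch b then PySem.Str.replace b ch "_" else b) b).toList
      = (String.ofList (b.toList.map (fun c => if c ∈ forbiddenSet then '_' else c))).toList := by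
    rw [hlist, foldA, fold_map, String.toList_ofList]
    apply List.map_congr_left
    intro a _
    have : (a ∈ forbiddenSet) ↔ a ∈ (['<', '>', ':', '\"', '/', '\\', '|', '?', '*'] : List Char) := by
      simp [forbiddenSet, PySem.Set.mem_ofList]
    by_cases h : a ∈ (['<', '>', ':', '\"', '/', '\\', '|', '?', '*'] : List Char)
    · simp [h, this.mpr h]
    · simp [this, h]
  rw [String.toList_inj.mp hkey]

-- ===== VERDICT (by name: the statement is the Claim_ definition above) =====
theorem sanitize_bucket_name_spec : Claim_equal_sanitize_bucket_name := by
  intro b _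
  show sanitize_bucket_name b = sanitize_bucket_name_alt b
  exact ab_eq b
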